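-- pv_equiv track=rewrite | github.com/koreanfoodbug/interview | 221007/오늘의집/2.py | solution
-- ===== SOURCE A (Python) =====
-- def solution(n, delay, forget):
--     person = [True, delay, forget]
--     arr = []
--     arr.append(list(person))
--
--     for i in range(n):
--         for j, element in enumerate(arr):
--             if (arr[j][1] != 0):
--                 arr[j][1] = arr[j][1] - 1
--
--             if (arr[j][2] != 0):
--                 arr[j][2] = arr[j][2] - 1
--
--             if (arr[j][2] == 0):
--                 arr[j][0] = False
--
--         for j, element in enumerate(arr):
--             if (arr[j][1] == 0 and arr[j][2] != 0 and arr[j][0] == True):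
--                 arr.append(list(person))
--
--     return len(list(map(lambda x: x[0], arr)))
-- ===== SOURCE B (Python) =====
-- def solution(n, delay, forget):
--     # Everyone created at the same step is in the same state forever, so track
--     # one cohort [alive, delay_left, forget_left, size] per creation step and
--     # add a whole cohort's size at once when its members reproduce.
--     cohorts = [[True, delay, forget, 1]]
--     total = 1
--     for _ in range(n):
--         births = 0
--         for c in cohorts:
--             if c[1] != 0:
--                 c[1] -= 1
--             if c[2] != 0:
--                 c[2] -= 1
--             if c[2] == 0:
--                 c[0] = False
--             if c[1] == 0 and c[2] != 0 and c[0]: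
--                 births += c[3]
--         if births:
--             cohorts.append([True, delay, forget, births])
--             total += births
--     return total
-- ===== Notes on version B (the rewrite author's own statement) =====
-- stated objective: alternative
-- what changed: A keeps one list entry per person and re-scans the whole (exponentially growing) population every step with an append-while-iterating inner loop; B groups everyone created at the same step into one cohort [alive, delay_left, forget_left, size] and adds a whole cohort's size at once, so the list has one entry per step instead of per person (intended as faster; the probe measured only 2.83x at the largest size both finished, since the big-integer birth counts dominate there). …
import Mathlib
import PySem

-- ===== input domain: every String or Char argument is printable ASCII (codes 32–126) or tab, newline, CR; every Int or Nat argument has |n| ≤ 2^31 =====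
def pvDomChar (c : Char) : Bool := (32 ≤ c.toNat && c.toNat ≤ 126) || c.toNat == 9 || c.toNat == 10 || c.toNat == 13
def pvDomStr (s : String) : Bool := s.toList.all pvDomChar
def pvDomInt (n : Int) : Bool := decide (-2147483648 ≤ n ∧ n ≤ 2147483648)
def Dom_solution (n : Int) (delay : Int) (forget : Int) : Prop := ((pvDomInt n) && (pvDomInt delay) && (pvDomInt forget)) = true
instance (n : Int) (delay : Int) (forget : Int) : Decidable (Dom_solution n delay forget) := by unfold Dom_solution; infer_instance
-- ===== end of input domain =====

-- B replaces A's one-entry-per-person simulation by one cohort per creation step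
-- (same update rules applied once per cohort, weighted by its size); the population
-- list no longer grows with the population, only with the step count.

-- ===== PORT A =====
-- a person is (alive, delay_counter, forget_counter).
-- The first inner loop updates each arr[j] in place, each independently of the others:
-- ported as a map of the per-element update (the three ifs in the Python order).
def pvDec (p : Bool × Int × Int) : Bool × Int × Int :=
  let d1 := if p.2.1 != 0 then p.2.1 - 1 else p.2.1
  let f1 := if p.2.2 != 0 then p.2.2 - 1 else p.2.2
  let a1 := if f1 == 0 then false else p.1
  (a1, d1, f1)

-- the Python condition `arr[j][1] == 0 and arr[j][2] != 0 and arr[j][0] == True`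
def pvCond (p : Bool × Int × Int) : Bool :=
  p.2.1 == 0 && p.2.2 != 0 && p.1 == true

-- the second inner loop: `for j, element in enumerate(arr)` while arr.append(...) runs —
-- CPython keeps iterating over the appended elements, so this is an index loop over a
-- growing list. The fuel only makes the same computation total: the Python diverges
-- exactly where the fuel could run out, and those inputs are outside Pre_solution.
def pvLoop2 (delay : Int) (forget : Int) : Nat → Nat → List (Bool × Int × Int) → List (Bool × Int × Int)
  | 0, _, arr => arr
  | fuel + 1, j, arr =>
    if j < arr.length then
      if pvCond (arr.getD j (true, delay, forget)) then
        pvLoop2 delay forget fuel (j + 1) (arr ++ [(true, delay, forget)])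
      else
        pvLoop2 delay forget fuel (j + 1) arr
    else arr

def pvStepA (delay : Int) (forget : Int) (arr : List (Bool × Int × Int)) : List (Bool × Int × Int) :=
  let arr1 := arr.map pvDec
  pvLoop2 delay forget (2 * arr1.length + 1) 0 arr1

def solution (n : Int) (delay : Int) (forget : Int) : Int :=
  (((PySem.List.pyRange 0 n 1).foldl (fun arr _ => pvStepA delay forget arr)
      [(true, delay, forget)]).length : Int)

-- ===== PORT B =====
-- a cohort is (alive, delay_left, forget_left, size); the per-cohort body of B's
-- inner loop: the three in-place ifs, then this cohort's contribution to births
def pvUpdB (c : Bool × Int × Int × Int) : (Bool × Int × Int × Int) × Int :=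
  let d1 := if c.2.1 != 0 then c.2.1 - 1 else c.2.1
  let f1 := if c.2.2.1 != 0 then c.2.2.1 - 1 else c.2.2.1
  let a1 := if f1 == 0 then false else c.1
  ((a1, d1, f1, c.2.2.2), if d1 == 0 && f1 != 0 && a1 then c.2.2.2 else 0)

-- one step of B: the `for c in cohorts` loop (a fold carrying the updated list and
-- the births accumulator), then `if births: append cohort; total += births`
def pvStepB (delay : Int) (forget : Int) (st : List (Bool × Int × Int × Int) × Int) :
    List (Bool × Int × Int × Int) × Int :=
  let p := st.1.foldl
    (fun (acc : List (Bool × Int × Int × Int) × Int) c =>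
      (acc.1 ++ [(pvUpdB c).1], acc.2 + (pvUpdB c).2)) ([], 0)
  if p.2 != 0 then (p.1 ++ [(true, delay, forget, p.2)], st.2 + p.2)
  else (p.1, st.2)

def solution_alt (n : Int) (delay : Int) (forget : Int) : Int :=
  ((PySem.List.pyRange 0 n 1).foldl (fun st _ => pvStepB delay forget st)
      ([(true, delay, forget, 1)], (1 : Int))).2

-- ===== PRECONDITION & SPEC =====
-- Pre_ excludes exactly the inputs on which A DIVERGES (its second inner loop keeps
-- appending a fresh person that immediately qualifies again): delay = 0 with n ≥ 1 and
-- forget ∉ {0, 1}. A returns normally on every other input.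
def Pre_solution (n : Int) (delay : Int) (forget : Int) : Prop :=
  ¬ (delay = 0 ∧ 1 ≤ n ∧ forget ≠ 0 ∧ forget ≠ 1)
instance (n : Int) (delay : Int) (forget : Int) : Decidable (Pre_solution n delay forget) := by
  unfold Pre_solution; infer_instance

def pvWitness_solution : Int × Int × Int := (4, 1, 3)

def Spec_solution (n : Int) (delay : Int) (forget : Int) (out : Int) : Prop := out = solution_alt n delay forget
instance (n : Int) (delay : Int) (forget : Int) (out : Int) : Decidable (Spec_solution n delay forget out) := by unfold Spec_solution; infer_instance

-- ===== CLAIM (what is proved, stated in full; the proofs are below) =====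
def Claim_equal_solution : Prop := ∀ (n : Int) (delay : Int) (forget : Int), Dom_solution n delay forget → Pre_solution n delay forget → Spec_solution n delay forget (solution n delay forget)

-- ===== LEMMAS AND PROOFS =====

-- the multiset of persons a cohort list denotes
def mExp : List (Bool × Int × Int × Int) → List (Bool × Int × Int)
  | [] => []
  | c :: r => List.replicate c.2.2.2.toNat (c.1, c.2.1, c.2.2.1) ++ mExp r

theorem mExp_append : ∀ (xs ys : List (Bool × Int × Int × Int)),
    mExp (xs ++ ys) = mExp xs ++ mExp ys := by
  intro xs ys
  induction xs with
  | nil => simp [mExp]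
  | cons c r ih => simp [mExp, ih]

theorem pvUpdB_fst (c : Bool × Int × Int × Int) :
    (pvUpdB c).1 = ((pvDec (c.1, c.2.1, c.2.2.1)).1, (pvDec (c.1, c.2.1, c.2.2.1)).2.1,
      (pvDec (c.1, c.2.1, c.2.2.1)).2.2, c.2.2.2) := rfl

theorem pvUpdB_snd (c : Bool × Int × Int × Int) :
    (pvUpdB c).2 = if pvCond (pvDec (c.1, c.2.1, c.2.2.1)) then c.2.2.2 else 0 := by
  simp only [pvUpdB, pvDec, pvCond]
  simp

-- the append-while-iterating loop, characterised: provided the appended fresh person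
-- never qualifies, it appends one fresh person per qualifying element of the list
theorem pvLoop2_go (d f : Int) : ∀ (fuel j : Nat) (arr : List (Bool × Int × Int)),
    arr.length - j + (arr.drop j).countP pvCond ≤ fuel →
    (pvCond (true, d, f) = true → (arr.drop j).countP pvCond = 0) →
    pvLoop2 d f fuel j arr = arr ++ List.replicate ((arr.drop j).countP pvCond) (true, d, f) := by
  intro fuel
  induction fuel with
  | zero =>
    intro j arr hf hc
    have hj : arr.length ≤ j := by omega
    have : arr.drop j = [] := List.drop_eq_nil_of_le hj
    simp [pvLoop2, this]
  | succ fuel ih =>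
    intro j arr hf hc
    by_cases hj : j < arr.length
    · have hdrop : arr[j] :: arr.drop (j + 1) = arr.drop j := List.getElem_cons_drop hj
      have hcnt : (arr.drop j).countP pvCond
          = (if pvCond arr[j] then 1 else 0) + (arr.drop (j + 1)).countP pvCond := by
        rw [← hdrop, List.countP_cons]; omega
      have hget : arr.getD j (true, d, f) = arr[j] := List.getD_eq_getElem arr _ hj
      by_cases hcj : pvCond arr[j] = true
      · have hnew : pvCond (true, d, f) = false := by
          by_contra hne
          have := hc (by revert hne; cases pvCond (true, d, f) <;> simp)
          rw [hcnt, hcj] at this; simp at this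
        have hdrop2 : (arr ++ [(true, d, f)]).drop (j + 1) = arr.drop (j + 1) ++ [(true, d, f)] := by
          rw [List.drop_append_of_le_length (by omega)]
        have hcnt2 : ((arr ++ [(true, d, f)]).drop (j + 1)).countP pvCond
            = (arr.drop (j + 1)).countP pvCond := by
          rw [hdrop2, List.countP_append]; simp [hnew]
        have hrec := ih (j + 1) (arr ++ [(true, d, f)])
          (by simp [hcnt2]; rw [hcnt, hcj] at hf; simp at hf; omega)
          (by intro h; rw [hnew] at h; cases h)
        simp only [pvLoop2, hj, if_pos, hget, hcj]
        rw [hrec, hcnt2, hcnt, hcj]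
        simp only [if_true, Nat.add_comm 1, List.replicate_succ]
        simp [List.append_assoc]
      · have hcj' : pvCond arr[j] = false := by revert hcj; cases pvCond arr[j] <;> simp
        have hcnt2 : (arr.drop (j + 1)).countP pvCond = (arr.drop j).countP pvCond := by
          rw [hcnt, hcj']; simp
        have hrec := ih (j + 1) arr (by omega) (fun h => by rw [hcnt2]; exact hc h)
        simp only [pvLoop2, hj, if_pos, hget, hcj']
        simp only [Bool.false_eq_true, if_false]
        rw [hrec, hcnt2]
    · have : arr.drop j = [] := List.drop_eq_nil_of_le (by omega)
      simp [pvLoop2, hj, this]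

theorem pvStepA_char (d f : Int) (arr : List (Bool × Int × Int))
    (hnew : pvCond (true, d, f) = true → (arr.map pvDec).countP pvCond = 0) :
    pvStepA d f arr
      = arr.map pvDec ++ List.replicate ((arr.map pvDec).countP pvCond) (true, d, f) := by
  have hfuel : (arr.map pvDec).length - 0 + ((arr.map pvDec).drop 0).countP pvCond
      ≤ 2 * (arr.map pvDec).length + 1 := by
    have := List.countP_le_length (l := arr.map pvDec) (p := pvCond)
    simp only [List.drop_zero]; omega
  have := pvLoop2_go d f (2 * (arr.map pvDec).length + 1) 0 (arr.map pvDec) hfuel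
    (by simpa using hnew)
  simpa [pvStepA] using this

-- updating every cohort is updating every denoted person
theorem mExp_map_upd : ∀ (cs : List (Bool × Int × Int × Int)),
    mExp (cs.map (fun c => (pvUpdB c).1)) = (mExp cs).map pvDec := by
  intro cs
  induction cs with
  | nil => simp [mExp]
  | cons c r ih =>
    simp only [List.map_cons, mExp, ih, List.map_append, List.map_replicate]
    simp [pvUpdB_fst]

-- the births accumulator counts the qualifying denoted persons
theorem births_eq : ∀ (cs : List (Bool × Int × Int × Int)), (∀ c ∈ cs, 0 ≤ c.2.2.2) →
    (cs.map (fun c => (pvUpdB c).2)).sum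
      = ((((mExp cs).map pvDec).countP pvCond : Nat) : Int) := by
  intro cs
  induction cs with
  | nil => intro _; simp [mExp]
  | cons c r ih =>
    intro hpos
    have hc := hpos c (by simp)
    have hr := ih (fun x hx => hpos x (by simp [hx]))
    simp only [pvUpdB_snd] at hr ⊢
    simp only [List.map_cons, List.sum_cons, mExp, List.map_append, List.map_replicate,
      List.countP_append, List.countP_replicate]
    rw [hr]
    push_cast
    split_ifs <;> omega

-- the inner fold of pvStepB, computed
theorem foldB_char : ∀ (cs : List (Bool × Int × Int × Int))
    (acc : List (Bool × Int × Int × Int) × Int),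
    cs.foldl (fun (acc : List (Bool × Int × Int × Int) × Int) c =>
        (acc.1 ++ [(pvUpdB c).1], acc.2 + (pvUpdB c).2)) acc
      = (acc.1 ++ cs.map (fun c => (pvUpdB c).1), acc.2 + (cs.map (fun c => (pvUpdB c).2)).sum) := by
  intro cs
  induction cs with
  | nil => intro acc; simp
  | cons c r ih =>
    intro acc
    simp only [List.foldl_cons, ih, List.map_cons, List.sum_cons]
    refine Prod.ext ?_ ?_
    · simp
    · simp; ring

-- joint induction over the steps, for delay ≠ 0: A's list is exactly the multiset
-- denoted by B's cohort list and B's total is its length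
theorem main_fold (d f : Int) (hd : d ≠ 0) :
    ∀ (L : List Int) (cs : List (Bool × Int × Int × Int)) (tot : Int),
      (∀ c ∈ cs, 0 ≤ c.2.2.2) → tot = ((mExp cs).length : Int) →
      ((L.foldl (fun arr _ => pvStepA d f arr) (mExp cs)).length : Int)
        = (L.foldl (fun st _ => pvStepB d f st) (cs, tot)).2 := by
  intro L
  induction L with
  | nil => intro cs tot _ ht; simpa using ht.symm
  | cons x L ih =>
    intro cs tot hpos ht
    have hfresh : pvCond (true, d, f) = false := by
      simp [pvCond]
      intro h; exact absurd h hd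
    have hA : pvStepA d f (mExp cs)
        = (mExp cs).map pvDec ++ List.replicate (((mExp cs).map pvDec).countP pvCond) (true, d, f) :=
      pvStepA_char d f (mExp cs) (by intro h; rw [hfresh] at h; cases h)
    have hB := births_eq cs hpos
    have hBstep : pvStepB d f (cs, tot)
        = (if (cs.map (fun c => (pvUpdB c).2)).sum != 0 then
            (cs.map (fun c => (pvUpdB c).1) ++ [(true, d, f, (cs.map (fun c => (pvUpdB c).2)).sum)],
              tot + (cs.map (fun c => (pvUpdB c).2)).sum)
          else (cs.map (fun c => (pvUpdB c).1), tot)) := by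
      simp only [pvStepB, foldB_char]
      simp
    by_cases hz : (cs.map (fun c => (pvUpdB c).2)).sum = 0
    · have hcnt0 : ((mExp cs).map pvDec).countP pvCond = 0 := by
        rw [hz] at hB; exact_mod_cast hB.symm
      simp only [List.foldl_cons]
      rw [hBstep, if_neg (by simp [hz]), hA, hcnt0]
      simp only [List.replicate_zero, List.append_nil]
      rw [← mExp_map_upd]
      exact ih _ tot
        (by intro c hc
            obtain ⟨c0, hc0, rfl⟩ := List.mem_map.mp hc
            rw [pvUpdB_fst]; exact hpos c0 hc0)
        (by rw [mExp_map_upd, List.length_map, ← ht])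
    · have hne : ((cs.map (fun c => (pvUpdB c).2)).sum != 0) = true := by
        simp [hz]
      simp only [List.foldl_cons]
      rw [hBstep, if_pos hne, hA]
      have hexp : (mExp cs).map pvDec
            ++ List.replicate (((mExp cs).map pvDec).countP pvCond) (true, d, f)
          = mExp (cs.map (fun c => (pvUpdB c).1)
              ++ [(true, d, f, (cs.map (fun c => (pvUpdB c).2)).sum)]) := by
        rw [mExp_append, mExp_map_upd]
        simp only [mExp, List.append_nil]
        congr 2
        rw [hB]
        simp
      rw [hexp]
      refine ih _ _ ?_ ?_
      · intro c hc
        rcases List.mem_append.mp hc with h | h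
        · obtain ⟨c0, hc0, rfl⟩ := List.mem_map.mp h
          rw [pvUpdB_fst]; exact hpos c0 hc0
        · simp at h
          subst h
          simp only []
          rw [hB]; positivity
      · rw [mExp_append, mExp_map_upd, List.length_append, List.length_map]
        simp only [mExp, List.append_nil, List.length_replicate]
        rw [hB]
        push_cast
        omega

-- the degenerate case delay = 0, forget ∈ {0, 1}: the single person dies at once
-- and nobody ever reproduces, on both sides
theorem degA : ∀ (L : List Int) (f : Int), (f = 0 ∨ f = 1) →
    ∀ (arr : List (Bool × Int × Int)), (arr = [(true, 0, f)] ∨ arr = [(false, 0, 0)]) →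
    (L.foldl (fun a _ => pvStepA 0 f a) arr).length = 1 := by
  intro L
  induction L with
  | nil => rintro f hf arr (rfl | rfl) <;> simp
  | cons x L ih =>
    rintro f hf arr harr
    simp only [List.foldl_cons]
    have hstep : pvStepA 0 f arr = [(false, 0, 0)] := by
      rcases harr with rfl | rfl <;> rcases hf with rfl | rfl <;> decide
    rw [hstep]
    exact ih f hf _ (Or.inr rfl)

theorem degB : ∀ (L : List Int) (f : Int), (f = 0 ∨ f = 1) →
    ∀ (st : List (Bool × Int × Int × Int) × Int),
    (st = ([(true, 0, f, 1)], 1) ∨ st = ([(false, 0, 0, 1)], 1)) →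
    (L.foldl (fun s _ => pvStepB 0 f s) st).2 = 1 := by
  intro L
  induction L with
  | nil => rintro f hf st (rfl | rfl) <;> simp
  | cons x L ih =>
    rintro f hf st hst
    simp only [List.foldl_cons]
    have hstep : pvStepB 0 f st = ([(false, 0, 0, 1)], 1) := by
      rcases hst with rfl | rfl <;> rcases hf with rfl | rfl <;> decide
    rw [hstep]
    exact ih f hf _ (Or.inr rfl)

theorem solution_spec_aux (n d f : Int) (hpre : Pre_solution n d f) :
    solution n d f = solution_alt n d f := by
  by_cases hn : n ≤ 0
  · have hnil : PySem.List.pyRange 0 n 1 = [] := PySem.List.pyRange_one_eq_nil (by omega)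
    simp [solution, solution_alt, hnil]
  · by_cases hd : d = 0
    · have hf : f = 0 ∨ f = 1 := by
        unfold Pre_solution at hpre
        by_contra h
        push Not at h
        exact hpre ⟨hd, by omega, h.1, h.2⟩
      subst hd
      have hA := degA (PySem.List.pyRange 0 n 1) f hf [(true, 0, f)] (Or.inl rfl)
      have hB := degB (PySem.List.pyRange 0 n 1) f hf ([(true, 0, f, 1)], 1) (Or.inl rfl)
      simp [solution, solution_alt, hA, hB]
    · have h0 : ([(true, d, f)] : List (Bool × Int × Int)) = mExp [(true, d, f, 1)] := by
        simp [mExp]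
      have := main_fold d f hd (PySem.List.pyRange 0 n 1) [(true, d, f, 1)] 1
        (by intro c hc; simp at hc; subst hc; norm_num)
        (by simp [mExp])
      rw [solution, solution_alt, h0]
      exact this

-- ===== VERDICT (by name: the statement is the Claim_ definition above) =====
theorem solution_spec : Claim_equal_solution := by
  intro n d f _hdom hpre
  exact solution_spec_aux n d f hpre
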